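-- pv_equiv track=rewrite | github.com/jl0up/magstab | magstab/dac/ad5791.py | _tuple_to_code
-- ===== SOURCE A (Python) =====
-- def _tuple_to_code(t: tuple, word_length=8) -> int:
--     '''Converts a tuple of words to a code (integer)
--     '''
--     try:
--         assert isinstance(t, tuple)
--         for _ in t:
--             assert isinstance(_, int)
--             assert 0 <= _ < 2**word_length
--     except:
--         raise
--     else:
--         return sum([ x << (word_length*i) for i,x in enumerate(t[::-1]) ])
-- ===== SOURCE B (Python) =====
-- def _tuple_to_code(t: tuple, word_length=8) -> int:
--     '''Converts a tuple of words to a code (integer)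
--     '''
--     try:
--         assert isinstance(t, tuple)
--         for x in t:
--             assert isinstance(x, int)
--             assert 0 <= x < 2**word_length
--     except:
--         raise
--     else:
--         code = 0
--         for x in t:
--             code = (code << word_length) + x
--         return code
-- ===== Notes on version B (the rewrite author's own statement) =====
-- stated objective: simpler
-- what changed: Replaces the reverse/enumerate/per-element-shift list comprehension and sum with a single forward Horner-style accumulator (code = (code << word_length) + x), eliminating the reversal and the index-dependent shift amounts.
-- outside the precondition, e.g. on _tuple_to_code((0,), -1): A returns 0, B raises ValueError
import Mathlib
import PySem

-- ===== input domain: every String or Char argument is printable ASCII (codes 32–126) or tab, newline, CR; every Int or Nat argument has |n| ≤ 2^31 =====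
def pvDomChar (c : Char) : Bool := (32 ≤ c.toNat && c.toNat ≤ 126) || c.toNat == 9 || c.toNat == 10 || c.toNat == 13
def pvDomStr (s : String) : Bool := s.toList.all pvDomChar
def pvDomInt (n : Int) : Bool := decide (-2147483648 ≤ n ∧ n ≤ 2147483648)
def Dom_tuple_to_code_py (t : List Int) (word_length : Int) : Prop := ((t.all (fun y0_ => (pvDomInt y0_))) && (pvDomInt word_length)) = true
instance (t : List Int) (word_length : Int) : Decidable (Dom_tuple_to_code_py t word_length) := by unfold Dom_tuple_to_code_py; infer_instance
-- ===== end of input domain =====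

-- B replaces the reversed-enumerate shift-and-sum with a forward Horner accumulator (same validation); equal return values on Pre_.


-- ===== PORT A =====
-- sum([ x << (word_length*i) for i,x in enumerate(t[::-1]) ]); '<<' is exact as *2^shift on Pre_ (shifts nonnegative there)
def tuple_to_code_py (t : List Int) (word_length : Int) : Int :=
  ((PySem.List.enumerate t.reverse).map (fun p => p.2 * 2 ^ (word_length * p.1).toNat)).sum

-- ===== PORT B =====
-- code = 0; for x in t: code = (code << word_length) + x
def tuple_to_code_py_alt (t : List Int) (word_length : Int) : Int :=
  t.foldl (fun code x => code * 2 ^ word_length.toNat + x) 0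

-- ===== PRECONDITION & SPEC =====
-- Pre_ excludes inputs where A's assertions fail (element not in [0, 2**word_length)) and the negative
-- word_length corner: there the range check forces every element to be 0 and A raises ValueError on a
-- negative shift for any second element, while on a one-element tuple (whose sole element the range check forces
-- to be zero) it returns zero only because the first shift amount is word_length*0 = 0 — B's shift raises
-- there, so that corner is excluded (see the cite in claim.json).
def Pre_tuple_to_code_py (t : List Int) (word_length : Int) : Prop :=
  (0 ≤ word_length ∨ t = []) ∧ ∀ x ∈ t, 0 ≤ x ∧ x < 2 ^ word_length.toNat
instance (t : List Int) (word_length : Int) : Decidable (Pre_tuple_to_code_py t word_length) := by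
  unfold Pre_tuple_to_code_py; infer_instance
def pvWitness_tuple_to_code_py : List Int × Int := ([1, 2, 3], 8)

def Spec_tuple_to_code_py (t : List Int) (word_length : Int) (out : Int) : Prop := out = tuple_to_code_py_alt t word_length
instance (t : List Int) (word_length : Int) (out : Int) : Decidable (Spec_tuple_to_code_py t word_length out) := by unfold Spec_tuple_to_code_py; infer_instance

-- ===== CLAIM (what is proved, stated in full; the proofs are below) =====
def Claim_equal_tuple_to_code_py : Prop := ∀ (t : List Int) (word_length : Int), Dom_tuple_to_code_py t word_length → Pre_tuple_to_code_py t word_length → Spec_tuple_to_code_py t word_length (tuple_to_code_py t word_length)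

-- ===== LEMMAS AND PROOFS =====

-- Horner accumulator = sum of pre-shifted terms of the reversed list (core equivalence).
theorem pv_horner_eq (b : Int) : ∀ (t : List Int) (a : Int),
    t.foldl (fun c x => c * b + x) a
      = a * b ^ t.length + ((PySem.List.enumerate t.reverse).map (fun p => p.2 * b ^ p.1.toNat)).sum := by
  intro t
  induction t with
  | nil => intro a; simp
  | cons y t ih =>
    intro a
    have h : (y :: t).reverse = t.reverse ++ [y] := by simp
    rw [List.foldl_cons, ih, h, PySem.List.enumerate_append]
    simp [PySem.List.enumerate, pow_succ]
    ring

theorem tuple_to_code_py_spec : Claim_equal_tuple_to_code_py := by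
  intro t wl _ hpre
  unfold Spec_tuple_to_code_py tuple_to_code_py tuple_to_code_py_alt
  rcases hpre with ⟨hwl | hnil, _⟩
  · -- rewrite A's exponents (word_length * i).toNat as wl.toNat * i, then Horner
    have hmap :
        ((PySem.List.enumerate t.reverse).map (fun p => p.2 * 2 ^ (wl * p.1).toNat)).sum
          = ((PySem.List.enumerate t.reverse).map (fun p => p.2 * (2 ^ wl.toNat) ^ p.1.toNat)).sum := by
      congr 1
      apply List.map_congr_left
      intro p hp
      rcases (PySem.List.mem_enumerate_iff _ _ _).1 hp with ⟨k, hk, hpk⟩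
      subst hpk
      have h1 : (wl * ((0 : Int) + (k : Int))).toNat = wl.toNat * k := by
        have hc : wl * ((0 : Int) + (k : Int)) = ((wl.toNat * k : Nat) : Int) := by
          push_cast [Int.toNat_of_nonneg hwl]; ring
        rw [hc, Int.toNat_natCast]
      rw [h1, ← pow_mul]
      simp
    rw [hmap]
    have := pv_horner_eq (2 ^ wl.toNat) t 0
    simp at this
    omega
  · subst hnil
    simp

-- ===== VERDICT (by name: the statement is the Claim_ definition above) =====
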